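-- pv_equiv track=rewrite | github.com/df7cb/aoc | 2015/20b.py | factors_sum
-- ===== SOURCE A (Python) =====
-- import math
--
-- def factors_sum(n):
--     f = 0
--     for i in range(1, int(math.sqrt(n))+1):
--         if n % i == 0:
--             if n <= 50 * i:
--                 f += i
--             div = int(n / i)
--             if div != i and n <= 50 * div:
--                 f += div
--     return f
-- ===== SOURCE B (Python) =====
-- def factors_sum(n):
--     # Sum divisors d of n with n <= 50*d by scanning the co-divisor k = n//d over 1..50.
--     f = 0
--     for k in range(1, 51):
--         if n % k == 0:
--             f += n // k
--     return f
-- ===== Notes on version B (the rewrite author's own statement) =====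
-- stated objective: alternative
-- what changed: Instead of scanning all candidate divisors up to sqrt(n) and adding both members of each qualifying divisor pair, B scans the fixed range of co-divisors k=1..50 and adds n//k whenever k divides n (d is a divisor with n <= 50*d iff its co-divisor n//d is <= 50).
import Mathlib
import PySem

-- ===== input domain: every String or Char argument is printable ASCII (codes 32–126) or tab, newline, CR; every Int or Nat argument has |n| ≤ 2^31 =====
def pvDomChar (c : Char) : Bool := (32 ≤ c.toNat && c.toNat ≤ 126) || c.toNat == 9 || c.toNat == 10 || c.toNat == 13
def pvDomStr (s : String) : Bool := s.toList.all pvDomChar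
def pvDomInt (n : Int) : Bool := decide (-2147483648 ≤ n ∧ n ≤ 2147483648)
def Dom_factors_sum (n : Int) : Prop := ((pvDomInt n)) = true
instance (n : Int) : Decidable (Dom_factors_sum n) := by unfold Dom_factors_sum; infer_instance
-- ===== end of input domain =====

-- B replaces A's sqrt-bounded divisor-pair scan by a fixed scan of the co-divisors 1..50 (a different traversal of the same divisor set).

-- ===== PORT A =====
-- int(math.sqrt(n)) is ported as Nat.sqrt n.toNat: exact on Pre_ (0 ≤ n ≤ 2^31), where the
-- correctly-rounded double sqrt truncates to the integer square root.
-- int(n / i) is ported as floor division: exact here since i divides n and n ≥ 0 on Pre_.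
def factors_sum (n : Int) : Int :=
  (PySem.List.pyRange 1 ((Nat.sqrt n.toNat : Int) + 1) 1).foldl
    (fun f i =>
      if PySem.Int.mod n i = 0 then
        let f := if n ≤ 50 * i then f + i else f
        let div := PySem.Int.floordiv n i
        if div ≠ i ∧ n ≤ 50 * div then f + div else f
      else f) 0

-- ===== PORT B =====
def factors_sum_alt (n : Int) : Int :=
  (PySem.List.pyRange 1 51 1).foldl
    (fun f k => if PySem.Int.mod n k = 0 then f + PySem.Int.floordiv n k else f) 0

-- ===== PRECONDITION & SPEC =====
-- Pre_ excludes exactly the inputs on which A raises: math.sqrt(n) raises ValueError for n < 0.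
def Pre_factors_sum (n : Int) : Prop := 0 ≤ n
instance (n : Int) : Decidable (Pre_factors_sum n) := by unfold Pre_factors_sum; infer_instance
def pvWitness_factors_sum : Int := (12)

def Spec_factors_sum (n : Int) (out : Int) : Prop := out = factors_sum_alt n
instance (n : Int) (out : Int) : Decidable (Spec_factors_sum n out) := by unfold Spec_factors_sum; infer_instance

-- ===== CLAIM (what is proved, stated in full; the proofs are below) =====
def Claim_equal_factors_sum : Prop := ∀ (n : Int), Dom_factors_sum n → Pre_factors_sum n → Spec_factors_sum n (factors_sum n)

-- ===== LEMMAS AND PROOFS =====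

-- Contribution of one index to A's loop (as a single added term).
def gA (n i : Int) : Int :=
  (if PySem.Int.mod n i = 0 ∧ n ≤ 50 * i then i else 0) +
  (if PySem.Int.mod n i = 0 ∧ (PySem.Int.floordiv n i ≠ i ∧ n ≤ 50 * PySem.Int.floordiv n i)
    then PySem.Int.floordiv n i else 0)

-- Contribution of one index to B's loop.
def gB (n k : Int) : Int := if PySem.Int.mod n k = 0 then PySem.Int.floordiv n k else 0

lemma bodyA_eq (n : Int) :
    (fun (f i : Int) =>
      if PySem.Int.mod n i = 0 then
        let f := if n ≤ 50 * i then f + i else f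
        let div := PySem.Int.floordiv n i
        if div ≠ i ∧ n ≤ 50 * div then f + div else f
      else f) = fun f i => f + gA n i := by
  funext f i
  simp only [gA]
  split_ifs <;> simp_all <;> ring

lemma bodyB_eq (n : Int) :
    (fun (f k : Int) => if PySem.Int.mod n k = 0 then f + PySem.Int.floordiv n k else f)
      = fun f k => f + gB n k := by
  funext f k
  simp only [gB]
  split_ifs <;> simp

-- A as a sum over its range.
lemma factors_sum_eq_sum (n : Int) :
    factors_sum n = ((PySem.List.pyRange 1 ((Nat.sqrt n.toNat : Int) + 1) 1).map (gA n)).sum := by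
  rw [factors_sum, bodyA_eq, PySem.List.foldl_add]
  ring

lemma factors_sum_alt_eq_sum (n : Int) :
    factors_sum_alt n = ((PySem.List.pyRange 1 51 1).map (gB n)).sum := by
  rw [factors_sum_alt, bodyB_eq, PySem.List.foldl_add]
  ring

-- Nat versions of the per-index contributions.
def hA (m j : ℕ) : ℕ :=
  (if j ∣ m ∧ m ≤ 50 * j then j else 0) +
  (if j ∣ m ∧ (m / j ≠ j ∧ m ≤ 50 * (m / j)) then m / j else 0)

def hB (m k : ℕ) : ℕ := if k ∣ m then m / k else 0

lemma pymod_eq_zero_iff (m j : ℕ) : PySem.Int.mod (m : Int) (j : Int) = 0 ↔ j ∣ m := by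
  simp
  exact Int.natCast_dvd_natCast

lemma gA_natCast (m j : ℕ) : gA (m : Int) (j : Int) = (hA m j : Int) := by
  simp only [gA, hA, pymod_eq_zero_iff, PySem.Int.floordiv_natCast, ne_eq, Nat.cast_inj,
    show ((50 : Int) * (j : Int)) = ((50 * j : ℕ) : Int) by push_cast; ring,
    show ((50 : Int) * ((m / j : ℕ) : Int)) = ((50 * (m / j) : ℕ) : Int) by push_cast; ring,
    Nat.cast_le]
  split_ifs <;> push_cast <;> ring

lemma gB_natCast (m k : ℕ) : gB (m : Int) (k : Int) = (hB m k : Int) := by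
  simp only [gB, hB, pymod_eq_zero_iff, PySem.Int.floordiv_natCast]
  split_ifs <;> simp

lemma sum_range_shift (m : ℕ) (f : ℕ → ℕ) :
    ∑ i ∈ Finset.range m, f (1 + i) = ∑ i ∈ Finset.Icc 1 m, f i := by
  rw [← Finset.Ico_succ_right_eq_Icc, Finset.sum_Ico_eq_sum_range]
  simp

lemma A_cast (m : ℕ) :
    factors_sum (m : Int) = ((∑ k ∈ Finset.range (Nat.sqrt m), hA m (1 + k) : ℕ) : Int) := by
  rw [factors_sum_eq_sum]
  simp only [Int.toNat_natCast]
  rw [PySem.List.pyRange_one]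
  have ht : (((Nat.sqrt m : Int) + 1 - 1)).toNat = Nat.sqrt m := by omega
  rw [ht, List.map_map]
  have hlist : ((List.range (Nat.sqrt m)).map (gA (m : Int) ∘ fun k : ℕ => 1 + (k : Int))).sum
      = ∑ k ∈ Finset.range (Nat.sqrt m), gA (m : Int) (1 + (k : Int)) := rfl
  rw [hlist, Nat.cast_sum]
  refine Finset.sum_congr rfl fun k _ => ?_
  have hc : (1 + (k : Int)) = ((1 + k : ℕ) : Int) := by push_cast; ring
  rw [hc, gA_natCast m (1 + k)]

lemma B_cast (m : ℕ) :
    factors_sum_alt (m : Int) = ((∑ k ∈ Finset.range 50, hB m (1 + k) : ℕ) : Int) := by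
  rw [factors_sum_alt_eq_sum]
  rw [PySem.List.pyRange_one]
  have ht : ((51 : Int) - 1).toNat = 50 := by omega
  rw [ht, List.map_map]
  have hlist : ((List.range 50).map (gB (m : Int) ∘ fun k : ℕ => 1 + (k : Int))).sum
      = ∑ k ∈ Finset.range 50, gB (m : Int) (1 + (k : Int)) := rfl
  rw [hlist, Nat.cast_sum]
  refine Finset.sum_congr rfl fun k _ => ?_
  have hc : (1 + (k : Int)) = ((1 + k : ℕ) : Int) := by push_cast; ring
  rw [hc, gB_natCast m (1 + k)]

-- arithmetic facts for the divisor pairing (m > 0 throughout)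
lemma co_le_sqrt {m d : ℕ} (hm : 0 < m) (hd : d ∣ m) (hds : Nat.sqrt m < d) :
    m / d ≤ Nat.sqrt m := by
  have hd0 : 0 < d := Nat.pos_of_dvd_of_pos hd hm
  have hmul : m / d * d = m := Nat.div_mul_cancel hd
  have hlt : m < d ^ 2 := Nat.sqrt_lt'.mp hds
  have hcd : m / d < d := by nlinarith [hmul]
  have : (m / d) ^ 2 ≤ m := by nlinarith [hmul]
  exact Nat.le_sqrt'.mpr this

lemma co_gt_sqrt {m j : ℕ} (hm : 0 < m) (hd : j ∣ m) (hjs : j ≤ Nat.sqrt m)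
    (hne : m / j ≠ j) : Nat.sqrt m < m / j := by
  have hj0 : 0 < j := Nat.pos_of_dvd_of_pos hd hm
  have hmul : m / j * j = m := Nat.div_mul_cancel hd
  have hsq : j ^ 2 ≤ m := Nat.le_sqrt'.mp hjs
  by_contra hle
  have hle' : m / j ≤ Nat.sqrt m := by omega
  have h2 : (m / j) ^ 2 ≤ m := Nat.le_sqrt'.mp hle'
  have hq0 : 0 < m / j := Nat.div_pos (Nat.le_of_dvd hm hd) hj0
  have ha : j ≤ m / j := Nat.le_of_mul_le_mul_right (by nlinarith [hmul]) hj0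
  have hb : m / j ≤ j := Nat.le_of_mul_le_mul_right (by nlinarith [hmul]) hq0
  exact hne (le_antisymm hb ha)

-- The combinatorial core, in ℕ.
lemma main_nat (m : ℕ) :
    ∑ k ∈ Finset.range (Nat.sqrt m), hA m (1 + k) = ∑ k ∈ Finset.range 50, hB m (1 + k) := by
  rcases Nat.eq_zero_or_pos m with rfl | hm
  · simp [hB, hA]
  rw [sum_range_shift, sum_range_shift]
  set s := Nat.sqrt m with hs
  -- split A's sum into the i-part and the complementary-divisor part
  have hsplit : ∑ j ∈ Finset.Icc 1 s, hA m j
      = (∑ j ∈ Finset.Icc 1 s, if j ∣ m ∧ m ≤ 50 * j then j else 0)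
      + ∑ j ∈ Finset.Icc 1 s, if j ∣ m ∧ (m / j ≠ j ∧ m ≤ 50 * (m / j)) then m / j else 0 := by
    rw [← Finset.sum_add_distrib]
    rfl
  have hT1 : (∑ j ∈ Finset.Icc 1 s, if j ∣ m ∧ m ≤ 50 * j then j else 0)
      = ∑ d ∈ m.divisors.filter (fun d => d ≤ s ∧ m ≤ 50 * d), d := by
    rw [← Finset.sum_filter]
    apply Finset.sum_congr _ (fun _ _ => rfl)
    ext d
    simp only [Finset.mem_filter, Finset.mem_Icc, Nat.mem_divisors]
    constructor
    · rintro ⟨⟨h1, h2⟩, h3, h4⟩; exact ⟨⟨h3, by omega⟩, h2, h4⟩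
    · rintro ⟨⟨h3, _⟩, h2, h4⟩
      exact ⟨⟨Nat.pos_of_dvd_of_pos h3 hm, h2⟩, h3, h4⟩
  have hT2 : (∑ j ∈ Finset.Icc 1 s, if j ∣ m ∧ (m / j ≠ j ∧ m ≤ 50 * (m / j)) then m / j else 0)
      = ∑ d ∈ m.divisors.filter (fun d => s < d ∧ m ≤ 50 * d), d := by
    rw [← Finset.sum_filter]
    refine Finset.sum_nbij' (i := fun j => m / j) (j := fun d => m / d) ?_ ?_ ?_ ?_ ?_
    · intro j hj
      simp only [Finset.mem_filter, Finset.mem_Icc] at hj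
      obtain ⟨⟨_, hjs⟩, hdvd, hne, h50⟩ := hj
      simp only [Finset.mem_filter, Nat.mem_divisors]
      exact ⟨⟨Nat.div_dvd_of_dvd hdvd, by omega⟩, co_gt_sqrt hm hdvd hjs hne, h50⟩
    · intro d hd
      simp only [Finset.mem_filter, Nat.mem_divisors] at hd
      obtain ⟨⟨hdvd, _⟩, hds, h50⟩ := hd
      have hco := co_le_sqrt hm hdvd hds
      have hdd : m / (m / d) = d := Nat.div_div_self hdvd (by omega)
      simp only [Finset.mem_filter, Finset.mem_Icc]
      have hd0 : 0 < d := Nat.pos_of_dvd_of_pos hdvd hm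
      have hq0 : 0 < m / d := Nat.div_pos (Nat.le_of_dvd hm hdvd) hd0
      exact ⟨⟨hq0, hco⟩, Nat.div_dvd_of_dvd hdvd, by omega, by rw [hdd]; exact h50⟩
    · intro j hj
      simp only [Finset.mem_filter, Finset.mem_Icc] at hj
      exact Nat.div_div_self hj.2.1 (by omega)
    · intro d hd
      simp only [Finset.mem_filter, Nat.mem_divisors] at hd
      exact Nat.div_div_self hd.1.1 (by omega)
    · intro j _; rfl
  have hcover : m.divisors.filter (fun d => d ≤ s ∧ m ≤ 50 * d)
      ∪ m.divisors.filter (fun d => s < d ∧ m ≤ 50 * d)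
      = m.divisors.filter (fun d => m ≤ 50 * d) := by
    rw [← Finset.filter_or]
    exact Finset.filter_congr fun d _ => by constructor <;> intro h <;> omega
  have hdisj : Disjoint (m.divisors.filter (fun d => d ≤ s ∧ m ≤ 50 * d))
      (m.divisors.filter (fun d => s < d ∧ m ≤ 50 * d)) := by
    rw [Finset.disjoint_left]
    intro a ha hb
    simp only [Finset.mem_filter] at ha hb
    omega
  have hRHS : ∑ j ∈ Finset.Icc 1 50, hB m j
      = ∑ d ∈ m.divisors.filter (fun d => m ≤ 50 * d), d := by
    have h1 : ∑ j ∈ Finset.Icc 1 50, hB m j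
        = ∑ j ∈ (Finset.Icc 1 50).filter (fun j => j ∣ m), m / j := by
      rw [Finset.sum_filter]
      rfl
    rw [h1]
    refine Finset.sum_nbij' (i := fun j => m / j) (j := fun d => m / d) ?_ ?_ ?_ ?_ ?_
    · intro k hk
      simp only [Finset.mem_filter, Finset.mem_Icc] at hk
      obtain ⟨⟨_, hk50⟩, hdvd⟩ := hk
      simp only [Finset.mem_filter, Nat.mem_divisors]
      refine ⟨⟨Nat.div_dvd_of_dvd hdvd, by omega⟩, ?_⟩
      have hmul : k * (m / k) = m := Nat.mul_div_cancel' hdvd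
      nlinarith
    · intro d hd
      simp only [Finset.mem_filter, Nat.mem_divisors] at hd
      obtain ⟨⟨hdvd, _⟩, h50⟩ := hd
      have hd0 : 0 < d := Nat.pos_of_dvd_of_pos hdvd hm
      have hq0 : 0 < m / d := Nat.div_pos (Nat.le_of_dvd hm hdvd) hd0
      have hmul : m / d * d = m := Nat.div_mul_cancel hdvd
      simp only [Finset.mem_filter, Finset.mem_Icc]
      refine ⟨⟨by omega, ?_⟩, Nat.div_dvd_of_dvd hdvd⟩
      nlinarith
    · intro j hj
      simp only [Finset.mem_filter, Finset.mem_Icc] at hj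
      exact Nat.div_div_self hj.2 (by omega)
    · intro d hd
      simp only [Finset.mem_filter, Nat.mem_divisors] at hd
      exact Nat.div_div_self hd.1.1 (by omega)
    · intro j _; rfl
  calc ∑ j ∈ Finset.Icc 1 s, hA m j
      = _ + _ := hsplit
    _ = ∑ d ∈ m.divisors.filter (fun d => m ≤ 50 * d), d := by
        rw [hT1, hT2, ← Finset.sum_union hdisj, hcover]
    _ = ∑ j ∈ Finset.Icc 1 50, hB m j := hRHS.symm

-- ===== VERDICT (by name: the statement is the Claim_ definition above) =====
theorem factors_sum_spec : Claim_equal_factors_sum := by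
  intro n _ hpre
  show factors_sum n = factors_sum_alt n
  have hm : n = ((n.toNat : ℕ) : Int) := (Int.toNat_of_nonneg hpre).symm
  rw [hm, A_cast, B_cast, main_nat]
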